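-- pv_equiv track=rewrite | github.com/QuocthT/pitch-predictor | src/models/markov.py | sequence_to_count_states
-- ===== SOURCE A (Python) =====
-- def _count_after(token: str) -> tuple[int, int]:
--     """
--     Return the (balls_delta, strikes_delta) a single pitch token adds.
--     Used to simulate count progression.
--     """
--     balls_delta   = 1 if token == "B" else 0
--     strikes_delta = 1 if token in {"Sw", "Sc", "F", "Ks", "Kc"} else 0
--     return balls_delta, strikes_delta
--
-- def sequence_to_count_states(seq: list[str]) -> list[tuple[int, int]]:
--     """
--     Walk through a pitch sequence and return the count *before* each pitch.
--     E.g.  ['B', 'Sc', 'Sw', 'Ks']  →  [(0,0), (1,0), (1,1), (1,2)]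
--     The last state is before the terminal pitch (which ends the PA).
--     """
--     b, s = 0, 0
--     states = []
--     for tok in seq:
--         states.append((b, s))
--         db, ds = _count_after(tok)
--         b = min(b + db, 3)
--         s = min(s + ds, 2)   # strikes cap at 2 (3rd = K or continuation)
--     return states
-- ===== SOURCE B (Python) =====
-- _STRIKES = {"Sw", "Sc", "F", "Ks", "Kc"}
--
-- def sequence_to_count_states(seq):
--     # Landmark algorithm: only the positions of the first 3 balls and the first
--     # 2 strikes can ever matter (the caps).  Collect those <=5 landmark indices
--     # once; the count before pitch i is how many landmarks precede i.
--     ball_pos = [i for i, t in enumerate(seq) if t == "B"][:3]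
--     strike_pos = [i for i, t in enumerate(seq) if t in _STRIKES][:2]
--     return [(sum(1 for j in ball_pos if j < i),
--              sum(1 for j in strike_pos if j < i))
--             for i in range(len(seq))]
-- ===== Notes on version B (the rewrite author's own statement) =====
-- stated objective: alternative
-- what changed: Replaces A's stateful capped running counters with a landmark algorithm: it first extracts the positions of the first 3 ball tokens and first 2 strike tokens (the only pitches the caps let matter), then emits for each position i the number of landmark positions before i; no running count state exists.
import Mathlib
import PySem

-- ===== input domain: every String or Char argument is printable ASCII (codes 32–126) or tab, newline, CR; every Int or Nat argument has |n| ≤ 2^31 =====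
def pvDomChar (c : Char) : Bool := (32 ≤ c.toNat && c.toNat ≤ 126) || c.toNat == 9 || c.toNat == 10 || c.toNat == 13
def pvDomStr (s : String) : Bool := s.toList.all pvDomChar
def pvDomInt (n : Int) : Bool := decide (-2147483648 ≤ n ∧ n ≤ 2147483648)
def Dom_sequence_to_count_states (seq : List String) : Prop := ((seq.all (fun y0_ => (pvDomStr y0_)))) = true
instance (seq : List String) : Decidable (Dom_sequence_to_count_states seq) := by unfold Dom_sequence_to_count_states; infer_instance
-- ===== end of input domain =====

-- B replaces A's stateful capped running counters by a landmark algorithm: it collects the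
-- positions of the first 3 balls / first 2 strikes once and counts landmarks before each index
-- (alternative decomposition, same O(n) cost).

-- ===== PORT A =====
-- _count_after: (balls_delta, strikes_delta) of one token
def countAfter (token : String) : Int × Int :=
  (if token = "B" then 1 else 0,
   if token = "Sw" ∨ token = "Sc" ∨ token = "F" ∨ token = "Ks" ∨ token = "Kc" then 1 else 0)

-- the loop of A: state (b, s, states accumulated)
def sequence_to_count_states (seq : List String) : List (Int × Int) :=
  (seq.foldl
    (fun (st : Int × Int × List (Int × Int)) tok =>
      let states := st.2.2 ++ [(st.1, st.2.1)]
      let d := countAfter tok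
      (min (st.1 + d.1) 3, min (st.2.1 + d.2) 2, states))
    (0, 0, [])).2.2

-- ===== PORT B =====
def isStrike (t : String) : Bool :=
  t == "Sw" || t == "Sc" || t == "F" || t == "Ks" || t == "Kc"

-- '[i for i, t in enumerate(seq) if p(t)]' : indices are Python ints (Int), via PySem.List.enumerate
def posOf (p : String → Bool) (seq : List String) : List Int :=
  ((PySem.List.enumerate seq).filter (fun q => p q.2)).map (fun q => q.1)

-- '[:3]' / '[:2]' on the (nonnegative-length) landmark list is List.take; the final
-- comprehension over range(len(seq)) is a map over pyRange; 'sum(1 for j in l if j < i)' is countP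
def sequence_to_count_states_alt (seq : List String) : List (Int × Int) :=
  let ballPos := (posOf (fun t => t == "B") seq).take 3
  let strikePos := (posOf isStrike seq).take 2
  (PySem.List.pyRange 0 (seq.length : Int) 1).map (fun i =>
    (((ballPos.countP (fun j => decide (j < i)) : Nat) : Int),
     ((strikePos.countP (fun j => decide (j < i)) : Nat) : Int)))

-- ===== PRECONDITION & SPEC =====
def Spec_sequence_to_count_states (seq : List String) (out : List (Int × Int)) : Prop := out = sequence_to_count_states_alt seq
instance (seq : List String) (out : List (Int × Int)) : Decidable (Spec_sequence_to_count_states seq out) := by unfold Spec_sequence_to_count_states; infer_instance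

-- ===== CLAIM (what is proved, stated in full; the proofs are below) =====
def Claim_equal_sequence_to_count_states : Prop := ∀ (seq : List String), Dom_sequence_to_count_states seq → Spec_sequence_to_count_states seq (sequence_to_count_states seq)

-- ===== LEMMAS AND PROOFS =====

def dB (t : String) : Int := if t = "B" then 1 else 0
def dS (t : String) : Int := if t = "Sw" ∨ t = "Sc" ∨ t = "F" ∨ t = "Ks" ∨ t = "Kc" then 1 else 0

-- A's loop, recursively, with the accumulator factored out
def goA : List String → Int → Int → List (Int × Int)
  | [], _, _ => []
  | t :: ts, b, s => (b, s) :: goA ts (min (b + dB t) 3) (min (s + dS t) 2)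

lemma foldlA_acc (ts : List String) : ∀ (b s : Int) (acc : List (Int × Int)),
    (ts.foldl
      (fun (st : Int × Int × List (Int × Int)) tok =>
        let states := st.2.2 ++ [(st.1, st.2.1)]
        let d := countAfter tok
        (min (st.1 + d.1) 3, min (st.2.1 + d.2) 2, states))
      (b, s, acc)).2.2 = acc ++ goA ts b s := by
  induction ts with
  | nil => intro b s acc; simp [goA]
  | cons t ts ih =>
      intro b s acc
      simp only [List.foldl_cons, goA]
      rw [ih]
      simp [countAfter, dB, dS]

-- intermediate recursive form: prefix counts cb, cs capped at emission
def goB : List String → Int → Int → List (Int × Int)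
  | [], _, _ => []
  | t :: ts, cb, cs => (min 3 cb, min 2 cs) :: goB ts (cb + dB t) (cs + dS t)

lemma map_eq_goB (ts : List String) : ∀ (cb cs : Int),
    (List.range ts.length).map (fun k =>
      (min 3 (cb + (((ts.take k).countP (fun t => t == "B") : Nat) : Int)),
       min 2 (cs + (((ts.take k).countP isStrike : Nat) : Int)))) = goB ts cb cs := by
  induction ts with
  | nil => intro cb cs; simp [goB]
  | cons t ts ih =>
      intro cb cs
      rw [List.length_cons, List.range_succ_eq_map]
      simp only [List.map_cons, List.map_map, Function.comp_def, List.take_succ_cons,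
        List.take_zero, List.countP_cons, List.countP_nil, goB]
      simp only [Nat.cast_zero, add_zero]
      congr 1
      rw [← ih (cb + dB t) (cs + dS t)]
      apply List.map_congr_left
      intro k _
      have hb : cb + (((ts.take k).countP (fun t => t == "B") + if t == "B" then 1 else 0 : Nat) : Int)
          = cb + dB t + (((ts.take k).countP (fun t => t == "B") : Nat) : Int) := by
        by_cases h : t = "B"
        · simp [dB, h]; ring
        · simp [dB, h]
      have hs : cs + (((ts.take k).countP isStrike + if isStrike t then 1 else 0 : Nat) : Int)
          = cs + dS t + (((ts.take k).countP isStrike : Nat) : Int) := by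
        have e2 : dS t = if isStrike t then 1 else 0 := by
          unfold dS isStrike
          by_cases h : t = "Sw" ∨ t = "Sc" ∨ t = "F" ∨ t = "Ks" ∨ t = "Kc"
          · rw [if_pos h, if_pos (by rcases h with h|h|h|h|h <;> simp [h])]
          · rw [if_neg h, if_neg (by rw [not_or, not_or, not_or, not_or] at h; simp [h.1, h.2.1, h.2.2.1, h.2.2.2.1, h.2.2.2.2])]
        rw [e2]
        by_cases h : isStrike t
        · simp [h]; ring
        · simp [h]
      rw [hb, hs]

lemma dB_bounds (t : String) : 0 ≤ dB t ∧ dB t ≤ 1 := by unfold dB; split <;> omega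
lemma dS_bounds (t : String) : 0 ≤ dS t ∧ dS t ≤ 1 := by unfold dS; split <;> omega

-- stepwise capping equals capping the running total (deltas nonnegative and ≤ 1)
lemma goA_eq_goB (ts : List String) : ∀ (cb cs : Int),
    goA ts (min cb 3) (min cs 2) = goB ts cb cs := by
  induction ts with
  | nil => intro cb cs; simp [goA, goB]
  | cons t ts ih =>
      intro cb cs
      obtain ⟨hb0, hb1⟩ := dB_bounds t
      obtain ⟨hs0, hs1⟩ := dS_bounds t
      have e1 : min (min cb 3 + dB t) 3 = min (cb + dB t) 3 := by omega
      have e2 : min (min cs 2 + dS t) 2 = min (cs + dS t) 2 := by omega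
      simp only [goA, goB, e1, e2, ih, min_comm]

-- landmark lists with an arbitrary start index (for the induction)
def posOfAux (p : String → Bool) (seq : List String) (s : Int) : List Int :=
  ((PySem.List.enumerate seq s).filter (fun q => p q.2)).map (fun q => q.1)

lemma posOf_eq_aux (p : String → Bool) (seq : List String) : posOf p seq = posOfAux p seq 0 := rfl

lemma posOfAux_cons (p : String → Bool) (t : String) (ts : List String) (s : Int) :
    posOfAux p (t :: ts) s = (if p t then [s] else []) ++ posOfAux p ts (s + 1) := by
  unfold posOfAux
  rw [PySem.List.enumerate_cons]
  by_cases h : p t <;> simp [h]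

lemma mem_posOfAux_ge (p : String → Bool) (ts : List String) (s j : Int)
    (hj : j ∈ posOfAux p ts s) : s ≤ j := by
  unfold posOfAux at hj
  simp only [List.mem_map, List.mem_filter] at hj
  obtain ⟨q, ⟨hq, _⟩, rfl⟩ := hj
  rw [PySem.List.mem_enumerate_iff] at hq
  obtain ⟨k, hk, rfl⟩ := hq
  simp

lemma pairwise_posOfAux (p : String → Bool) (ts : List String) (s : Int) :
    (posOfAux p ts s).Pairwise (· < ·) := by
  unfold posOfAux
  exact (((PySem.List.pairwise_lt_enumerate ts s).filter _).map _ (fun a b h => h))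

-- elements below a threshold form a prefix of a sorted list, so capping the
-- prefix length caps the count
lemma countP_take_of_pairwise (P : List Int) (hP : P.Pairwise (· < ·)) (k : Nat) (i : Int) :
    (P.take k).countP (fun j => decide (j < i)) = min k (P.countP (fun j => decide (j < i))) := by
  induction P generalizing k with
  | nil => simp
  | cons q P ihP =>
      cases k with
      | zero => simp
      | succ k =>
          rw [List.pairwise_cons] at hP
          obtain ⟨hq, hP'⟩ := hP
          by_cases h : q < i
          · simp [List.take_succ_cons, h, ihP hP' k]
          · have hz : P.countP (fun j => decide (j < i)) = 0 := by
              rw [List.countP_eq_zero]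
              intro x hx
              have := hq x hx
              simp
              omega
            have hz' : (P.take k).countP (fun j => decide (j < i)) = 0 := by
              rw [List.countP_eq_zero]
              intro x hx
              have := hq x (List.mem_of_mem_take hx)
              simp
              omega
            simp [List.take_succ_cons, h, hz, hz']

-- counting landmarks below s + k equals counting matching tokens in the length-k prefix
lemma countP_posOfAux (p : String → Bool) (ts : List String) : ∀ (s : Int) (k : Nat),
    (posOfAux p ts s).countP (fun j => decide (j < s + (k : Int))) = (ts.take k).countP p := by
  induction ts with
  | nil => intro s k; simp [posOfAux, PySem.List.enumerate]
  | cons t ts ih =>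
      intro s k
      rw [posOfAux_cons]
      cases k with
      | zero =>
          simp only [List.take_zero, List.countP_nil]
          rw [List.countP_eq_zero]
          intro j hj
          simp only [List.mem_append] at hj
          have hge : s ≤ j := by
            rcases hj with hj | hj
            · by_cases h : p t
              · simp [h] at hj; omega
              · simp [h] at hj
            · have := mem_posOfAux_ge p ts (s + 1) j hj; omega
          simp only [Nat.cast_zero, add_zero, decide_eq_true_eq]
          omega
      | succ k =>
          rw [List.countP_append, List.take_succ_cons, List.countP_cons]
          have htail : (posOfAux p ts (s + 1)).countP (fun j => decide (j < s + ((k + 1 : Nat) : Int)))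
              = (ts.take k).countP p := by
            have harg : s + ((k + 1 : Nat) : Int) = (s + 1) + (k : Int) := by push_cast; ring
            rw [harg, ih (s + 1) k]
          rw [htail]
          by_cases h : p t
          · have hlt : s < s + ((k + 1 : Nat) : Int) := by
              have : (0 : Int) < ((k + 1 : Nat) : Int) := by positivity
              omega
            simp [h]
            omega
          · simp [h]

-- B's per-position pair, rewritten through the two lemmas above
lemma alt_pointwise (seq : List String) (k : Nat) (i : Int) (hi : i = (k : Int)) :
    ((((posOf (fun t => t == "B") seq).take 3).countP (fun j => decide (j < i)) : Nat) : Int)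
      = min 3 ((((seq.take k).countP (fun t => t == "B") : Nat) : Int))
    ∧ ((((posOf isStrike seq).take 2).countP (fun j => decide (j < i)) : Nat) : Int)
      = min 2 ((((seq.take k).countP isStrike : Nat) : Int)) := by
  subst hi
  constructor
  · rw [posOf_eq_aux, countP_take_of_pairwise _ (pairwise_posOfAux _ seq 0)]
    have := countP_posOfAux (fun t => t == "B") seq 0 k
    rw [zero_add] at this
    rw [this]
    push_cast [Nat.cast_min]
    rfl
  · rw [posOf_eq_aux, countP_take_of_pairwise _ (pairwise_posOfAux _ seq 0)]
    have := countP_posOfAux isStrike seq 0 k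
    rw [zero_add] at this
    rw [this]
    push_cast [Nat.cast_min]
    rfl

lemma alt_map (seq : List String) :
    (List.range seq.length).map (fun (k : Nat) =>
      (((((posOf (fun t => t == "B") seq).take 3).countP (fun j => decide (j < 0 + (k : Int))) : Nat) : Int),
       ((((posOf isStrike seq).take 2).countP (fun j => decide (j < 0 + (k : Int))) : Nat) : Int)))
      = goB seq 0 0 := by
  refine Eq.trans (List.map_congr_left ?_) (map_eq_goB seq 0 0)
  intro k _
  obtain ⟨h1, h2⟩ := alt_pointwise seq k (0 + (k : Int)) (zero_add _)
  rw [h1, h2]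
  simp

-- ===== VERDICT (by name: the statement is the Claim_ definition above) =====
theorem sequence_to_count_states_spec : Claim_equal_sequence_to_count_states := by
  intro seq _
  unfold Spec_sequence_to_count_states sequence_to_count_states sequence_to_count_states_alt
  have hA := foldlA_acc seq 0 0 []
  simp only [List.nil_append] at hA
  rw [hA]
  rw [PySem.List.pyRange_one]
  simp only [sub_zero, Int.toNat_natCast]
  rw [List.map_map]
  exact Eq.trans (by simpa using goA_eq_goB seq 0 0) (alt_map seq).symm
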